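-- pv_equiv track=rewrite | github.com/wasonaiemail-dev/telegram-assistant | features/gifts.py | _find_gift
-- ===== SOURCE A (Python) =====
-- def _find_gift(gifts: list[dict], person: str, idea: str = "") -> dict | None:
--     """Find a gift by person name (and optionally idea substring)."""
--     p_lower = person.lower().strip() if person else ""
--     i_lower = idea.lower().strip() if idea else ""
--
--     matches = []
--     for g in gifts:
--         gp = g.get("_person", "").lower()
--         gi = g.get("_idea", "").lower()
--         if p_lower and p_lower not in gp:
--             continue
--         if i_lower and i_lower not in gi:
--             continue
--         matches.append(g)
--
--     if not matches:
--         return None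
--     # Return best match (shortest idea title if multiple)
--     return min(matches, key=lambda g: len(g.get("_idea", "")))
-- ===== SOURCE B (Python) =====
-- def _find_gift(gifts: list[dict], person: str, idea: str = "") -> dict | None:
--     """Find a gift by person name (and optionally idea substring)."""
--     p_lower = person.lower().strip() if person else ""
--     i_lower = idea.lower().strip() if idea else ""
--
--     # Stable sort by idea length, then return the first gift that passes the
--     # filters: stability makes this exactly min's first-wins tie behaviour.
--     for g in sorted(gifts, key=lambda g: len(g.get("_idea", ""))):
--         if p_lower and p_lower not in g.get("_person", "").lower():
--             continue
--         if i_lower and i_lower not in g.get("_idea", "").lower():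
--             continue
--         return g
--     return None
-- ===== Notes on version B (the rewrite author's own statement) =====
-- stated objective: alternative
-- what changed: Instead of collecting all matches and then taking min by idea length, B stably sorts the gifts by idea length up front and returns the first gift in sorted order that passes the two substring filters (early exit); sort stability reproduces min's first-wins tie-breaking.
import Mathlib
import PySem

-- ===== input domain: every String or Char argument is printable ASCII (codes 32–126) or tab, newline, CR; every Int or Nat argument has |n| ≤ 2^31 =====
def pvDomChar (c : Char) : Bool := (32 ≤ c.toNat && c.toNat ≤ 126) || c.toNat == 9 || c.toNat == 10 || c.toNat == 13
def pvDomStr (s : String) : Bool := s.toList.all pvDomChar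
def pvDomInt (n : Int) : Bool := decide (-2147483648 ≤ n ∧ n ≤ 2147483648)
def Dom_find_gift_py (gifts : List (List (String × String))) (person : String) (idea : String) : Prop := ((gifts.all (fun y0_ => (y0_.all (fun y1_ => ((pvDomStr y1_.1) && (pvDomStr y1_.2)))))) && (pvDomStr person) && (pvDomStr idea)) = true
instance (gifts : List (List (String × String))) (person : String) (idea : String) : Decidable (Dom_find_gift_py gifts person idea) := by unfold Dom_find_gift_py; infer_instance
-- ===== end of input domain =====

-- B replaces A's "collect matches, then min(..., key=len of idea)" by a stable sort of the gifts
-- by idea length followed by an early-exit scan for the first gift passing the filters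
-- (stability reproduces min's first-wins tie-breaking); objective: alternative algorithm.


-- ===== PORT A =====
def find_gift_py (gifts : List (List (String × String))) (person : String) (idea : String) : Option (List (String × String)) :=
  let p_lower := if person ≠ "" then PySem.Str.strip (PySem.Str.lower person) else ""
  let i_lower := if idea ≠ "" then PySem.Str.strip (PySem.Str.lower idea) else ""
  let matched := gifts.foldl (fun acc g =>
    let gp := PySem.Str.lower ((PySem.Dict.mk g).getD "_person" "")
    let gi := PySem.Str.lower ((PySem.Dict.mk g).getD "_idea" "")
    if p_lower ≠ "" && !(PySem.Str.isIn p_lower gp) then acc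
    else if i_lower ≠ "" && !(PySem.Str.isIn i_lower gi) then acc
    else acc ++ [g]) []
  if matched = [] then none
  else PySem.List.min? matched (fun g => PySem.Str.len ((PySem.Dict.mk g).getD "_idea" ""))

-- ===== PORT B =====
def find_gift_py_alt (gifts : List (List (String × String))) (person : String) (idea : String) : Option (List (String × String)) :=
  let p_lower := if person ≠ "" then PySem.Str.strip (PySem.Str.lower person) else ""
  let i_lower := if idea ≠ "" then PySem.Str.strip (PySem.Str.lower idea) else ""
  -- 'for g in sorted(...): if guard: continue; ...; return g / return None' = find? of the pass test over the sorted list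
  (PySem.List.sorted gifts (fun g => PySem.Str.len ((PySem.Dict.mk g).getD "_idea" ""))).find?
    (fun g =>
      if p_lower ≠ "" && !(PySem.Str.isIn p_lower (PySem.Str.lower ((PySem.Dict.mk g).getD "_person" ""))) then false
      else if i_lower ≠ "" && !(PySem.Str.isIn i_lower (PySem.Str.lower ((PySem.Dict.mk g).getD "_idea" ""))) then false
      else true)

-- ===== PRECONDITION & SPEC =====
def Spec_find_gift_py (gifts : List (List (String × String))) (person : String) (idea : String) (out : Option (List (String × String))) : Prop := out = find_gift_py_alt gifts person idea
instance (gifts : List (List (String × String))) (person : String) (idea : String) (out : Option (List (String × String))) : Decidable (Spec_find_gift_py gifts person idea out) := by unfold Spec_find_gift_py; infer_instance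

-- ===== CLAIM (what is proved, stated in full; the proofs are below) =====
def Claim_equal_find_gift_py : Prop := ∀ (gifts : List (List (String × String))) (person : String) (idea : String), Dom_find_gift_py gifts person idea → Spec_find_gift_py gifts person idea (find_gift_py gifts person idea)

-- ===== LEMMAS AND PROOFS =====

-- A's matches-building loop with its two 'continue' guards, abstractly: filter
theorem pvA_fold {α : Type} (c1 c2 : α → Bool) (l acc : List α) :
    l.foldl (fun acc g => if c1 g then acc else if c2 g then acc else acc ++ [g]) acc
      = acc ++ l.filter (fun g => !c1 g && !c2 g) := by
  induction l generalizing acc with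
  | nil => simp
  | cons g t ih =>
    simp only [List.foldl_cons, List.filter_cons]
    cases h1 : c1 g with
    | true => simp [ih]
    | false =>
      cases h2 : c2 g with
      | true => simp [ih]
      | false => simp [ih]

-- head of insertBy as one first-min step
theorem pvHead_insertBy {α : Type} (key : α → Int) (x : α) (ys : List α) :
    (PySem.List.insertBy (fun a b => decide (key a < key b)) x ys).head?
      = (match ys.head? with
         | none => some x
         | some m => if key x < key m then some x else some m) := by
  cases ys with
  | nil => simp [PySem.List.insertBy]
  | cons y t =>
    simp only [PySem.List.insertBy, List.head?_cons]
    by_cases h : key x < key y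
    · simp [h]
    · simp [h]

-- head of the insertion-sort fold is the running first-minimum
theorem pvHead_foldl_insertBy {α : Type} (key : α → Int) (l : List α) (acc : List α) :
    (l.foldl (fun a x => PySem.List.insertBy (fun a b => decide (key a < key b)) x a) acc).head?
      = l.foldl (fun (o : Option α) x =>
          match o with
          | none => some x
          | some m => if key x < key m then some x else some m) acc.head? := by
  induction l generalizing acc with
  | nil => rfl
  | cons x t ih =>
    simp only [List.foldl_cons]
    rw [ih, pvHead_insertBy]

-- the head of a stable sort is Python's min (first extremal element)
theorem pvHead_sorted_eq_min? {α : Type} (key : α → Int) (l : List α) :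
    (PySem.List.sorted l key).head? = PySem.List.min? l key := by
  rw [PySem.List.sorted_eq_foldl_insertBy, pvHead_foldl_insertBy]
  rfl

-- filtering commutes with inserting into a key-sorted list
theorem pvFilter_insertBy {α : Type} (key : α → Int) (p : α → Bool) (x : α) (ys : List α)
    (hs : ys.Pairwise (fun a b => key a ≤ key b)) :
    (PySem.List.insertBy (fun a b => decide (key a < key b)) x ys).filter p
      = if p x then PySem.List.insertBy (fun a b => decide (key a < key b)) x (ys.filter p)
        else ys.filter p := by
  induction ys with
  | nil => cases h : p x <;> simp [PySem.List.insertBy, h]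
  | cons y t ih =>
    have hs' : t.Pairwise (fun a b => key a ≤ key b) := hs.tail
    have hy : ∀ z ∈ t, key y ≤ key z := by
      intro z hz; exact List.rel_of_pairwise_cons hs hz
    by_cases h : key x < key y
    · rw [show PySem.List.insertBy (fun a b => decide (key a < key b)) x (y :: t)
          = x :: y :: t by simp [PySem.List.insertBy, h]]
      cases hx : p x with
      | false => simp [List.filter_cons, hx]
      | true =>
        rw [List.filter_cons_of_pos hx]
        simp only [if_true]
        -- goal: x :: (y::t).filter p = insertBy x ((y::t).filter p)
        cases hf : (y :: t).filter p with
        | nil => simp [PySem.List.insertBy]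
        | cons h0 t0 =>
          have hmem : h0 ∈ y :: t := by
            have : h0 ∈ (y :: t).filter p := by rw [hf]; exact List.mem_cons_self
            exact List.mem_of_mem_filter this
          have hlt : key x < key h0 := by
            rcases List.mem_cons.mp hmem with rfl | hmt
            · exact h
            · exact lt_of_lt_of_le h (hy _ hmt)
          simp [PySem.List.insertBy, hlt]
    · rw [show PySem.List.insertBy (fun a b => decide (key a < key b)) x (y :: t)
          = y :: PySem.List.insertBy (fun a b => decide (key a < key b)) x t by
            simp [PySem.List.insertBy, h]]
      cases hyp : p y with
      | false =>
        rw [List.filter_cons_of_neg (by simp [hyp]), List.filter_cons_of_neg (by simp [hyp]),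
          ih hs']
      | true =>
        rw [List.filter_cons_of_pos hyp, List.filter_cons_of_pos hyp, ih hs']
        cases hx : p x with
        | false => simp
        | true =>
          simp only [if_true]
          -- y :: insertBy x (t.filter p) = insertBy x (y :: t.filter p) since ¬ key x < key y
          simp [PySem.List.insertBy, h]

-- filtering commutes with the stable sort
theorem pvFilter_sorted {α : Type} (key : α → Int) (p : α → Bool) (l : List α) :
    (PySem.List.sorted l key).filter p = PySem.List.sorted (l.filter p) key := by
  induction l using List.reverseRecOn with
  | nil => rfl
  | append_singleton t x ih =>
    have hsnoc : ∀ (m : List α), PySem.List.sorted (m ++ [x]) key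
        = PySem.List.insertBy (fun a b => decide (key a < key b)) x (PySem.List.sorted m key) := by
      intro m
      rw [PySem.List.sorted_eq_foldl_insertBy, PySem.List.sorted_eq_foldl_insertBy,
        List.foldl_append]
      rfl
    rw [hsnoc, pvFilter_insertBy key p x _ (PySem.List.sorted_pairwise t key),
      List.filter_append, ih]
    cases hx : p x with
    | false => simp [hx]
    | true => simp only [hx, if_true, List.filter_cons, List.filter_nil, hsnoc]

-- ===== VERDICT (by name: the statement is the Claim_ definition above) =====
theorem find_gift_py_spec : Claim_equal_find_gift_py := by
  intro gifts person idea _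
  unfold Spec_find_gift_py
  simp only [find_gift_py, find_gift_py_alt]
  set key := fun g : List (String × String) => PySem.Str.len ((PySem.Dict.mk g).getD "_idea" "") with hkey
  set c1 := fun g : List (String × String) =>
    (if person ≠ "" then PySem.Str.strip (PySem.Str.lower person) else "") ≠ "" &&
      !(PySem.Str.isIn (if person ≠ "" then PySem.Str.strip (PySem.Str.lower person) else "")
        (PySem.Str.lower ((PySem.Dict.mk g).getD "_person" ""))) with hc1
  set c2 := fun g : List (String × String) =>
    (if idea ≠ "" then PySem.Str.strip (PySem.Str.lower idea) else "") ≠ "" &&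
      !(PySem.Str.isIn (if idea ≠ "" then PySem.Str.strip (PySem.Str.lower idea) else "")
        (PySem.Str.lower ((PySem.Dict.mk g).getD "_idea" ""))) with hc2
  have hpass : (fun g => if c1 g then false else if c2 g then false else true)
      = (fun g => !c1 g && !c2 g) := by
    funext g; cases h1 : c1 g <;> cases h2 : c2 g <;> simp
  rw [pvA_fold c1 c2 gifts [], List.nil_append, hpass,
    ← List.head?_filter, pvFilter_sorted key _ gifts, pvHead_sorted_eq_min?]
  cases hf : gifts.filter (fun g => !c1 g && !c2 g) with
  | nil => simp [PySem.List.min?]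
  | cons a t => simp
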